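-- pv_equiv track=rewrite | github.com/subhayu99/autoipindia | backend/helpers/combinations.py | generate_combinations_sorted
-- ===== SOURCE A (Python) =====
-- from itertools import product
--
-- SIMILAR_LOOKING_NUMBERS = {
--     0: [3, 8],
--     1: [4, 7],
--     2: [7],
--     3: [0, 8],
--     4: [1, 7],
--     5: [6],
--     6: [5],
--     7: [1, 4],
--     8: [0, 3],
--     9: [5, 3],
-- }
--
-- def generate_combinations(code):
--     """
--     Generate all possible combinations of a code based on similar-looking numbers.
--
--     Args:
--         code (str): The original code (e.g., "881558")
--
--     Returns:
--         list: All possible combinations including the original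
--     """
--     # Convert code to list of integers
--     digits = [int(d) for d in str(code)]
--
--     # For each digit, create a list of possible alternatives (including the original)
--     possibilities = []
--     for digit in digits:
--         # Start with the original digit
--         alternatives = [digit]
--         # Add similar looking numbers if they exist
--         if digit in SIMILAR_LOOKING_NUMBERS:
--             alternatives.extend(SIMILAR_LOOKING_NUMBERS[digit])
--         # Remove duplicates while preserving order
--         alternatives = list(dict.fromkeys(alternatives))
--         possibilities.append(alternatives)
--
--     # Generate all combinations using cartesian product
--     combinations = []
--     for combination in product(*possibilities):
--         combinations.append(''.join(map(str, combination)))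
--
--     return combinations
--
-- def generate_combinations_sorted(code, max_combinations=None):
--     """
--     Generate combinations sorted by likelihood (original first, then by number of changes).
--
--     Args:
--         code (str): The original code
--         max_combinations (int, optional): Maximum number of combinations to return
--
--     Returns:
--         list: Sorted combinations with original first
--     """
--     original = str(code)
--     combinations = generate_combinations(code)
--
--     # Calculate "distance" from original (number of different digits)
--     def distance_from_original(combo):
--         return sum(1 for i, (a, b) in enumerate(zip(original, combo)) if a != b)
--
--     # Sort by distance from original (0 = original, 1 = one change, etc.)
--     combinations.sort(key=distance_from_original)
--
--     if max_combinations: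
--         return combinations[:max_combinations]
--
--     return combinations
-- ===== SOURCE B (Python) =====
-- SIM = {'0': ['3', '8'], '1': ['4', '7'], '2': ['7'], '3': ['0', '8'], '4': ['1', '7'],
--        '5': ['6'], '6': ['5'], '7': ['1', '4'], '8': ['0', '3'], '9': ['5', '3']}
--
-- def generate_combinations_sorted(code, max_combinations=None):
--     original = str(code)
--     # Build all variants left to right, carrying the number of changed digits along,
--     # then bucket by that distance (counting sort) instead of comparison-sorting.
--     items = [('', 0)]
--     for ch in original:
--         alts = [ch] + SIM[ch]
--         items = [(s + a, d + (a != ch)) for s, d in items for a in alts]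
--     buckets = [[] for _ in range(len(original) + 1)]
--     for s, d in items:
--         buckets[d].append(s)
--     result = [s for b in buckets for s in b]
--     if max_combinations:
--         return result[:max_combinations]
--     return result
-- ===== Notes on version B (the rewrite author's own statement) =====
-- stated objective: faster
-- what changed: B builds the variants left to right while carrying the number of changed digits along, then orders them by bucketing into lists indexed by that distance (a counting sort), instead of A's generate-all-tuples / join / recompute-distance-per-string / comparison sort.
import Mathlib
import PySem

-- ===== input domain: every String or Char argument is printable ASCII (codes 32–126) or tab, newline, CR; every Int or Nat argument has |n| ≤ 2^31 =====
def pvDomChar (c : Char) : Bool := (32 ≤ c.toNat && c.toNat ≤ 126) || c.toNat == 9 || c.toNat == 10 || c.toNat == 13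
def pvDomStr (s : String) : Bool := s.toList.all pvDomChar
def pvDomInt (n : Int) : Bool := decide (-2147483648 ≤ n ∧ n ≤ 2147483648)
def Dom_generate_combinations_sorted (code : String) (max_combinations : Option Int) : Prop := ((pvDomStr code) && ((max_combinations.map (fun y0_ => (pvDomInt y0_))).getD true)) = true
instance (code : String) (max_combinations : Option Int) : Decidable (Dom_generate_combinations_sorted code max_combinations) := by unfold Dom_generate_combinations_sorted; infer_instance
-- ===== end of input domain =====

-- B replaces A's comparison sort (distance key recomputed per produced string) by carrying
-- the distance along while the variants are generated and bucketing by it (counting sort);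
-- measurably faster by a constant factor. Proved: identical return values on Pre_.

-- ===== PORT A =====

-- SIMILAR_LOOKING_NUMBERS
def pvSimilarLookingNumbers : PySem.Dict Int (List Int) :=
  PySem.Dict.ofList [(0,[3,8]),(1,[4,7]),(2,[7]),(3,[0,8]),(4,[1,7]),(5,[6]),(6,[5]),(7,[1,4]),(8,[0,3]),(9,[5,3])]

-- int(d) for a one-character string: exact on '0'..'9' (guaranteed by Pre_);
-- Python raises ValueError on any other character (excluded by Pre_).
def pvIntOfDigit (c : Char) : Int := (PySem.Int.ofChars? [c]).getD 0

def generate_combinations (code : String) : List String :=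
  let digits : List Int := code.toList.map pvIntOfDigit
  let possibilities : List (List Int) := digits.map (fun digit =>
    let alternatives : List Int := [digit]
    let alternatives : List Int :=
      if pvSimilarLookingNumbers.contains digit then
        alternatives ++ pvSimilarLookingNumbers.getD digit []
      else alternatives
    PySem.List.dedup alternatives)
  -- itertools.product(*possibilities): leftmost position varies slowest
  let combinations : List (List Int) :=
    possibilities.foldr (fun p acc => p.flatMap (fun x => acc.map (x :: ·))) [[]]
  combinations.map (fun combination => PySem.Str.join "" (combination.map PySem.Int.toStr))

def generate_combinations_sorted (code : String) (max_combinations : Option Int) : List String :=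
  let original := code
  let combinations := generate_combinations code
  -- sum(1 for i, (a, b) in enumerate(zip(original, combo)) if a != b): the index is unused,
  -- the sum of one per hit over the zip is its countP
  let distance_from_original : String → Nat :=
    fun combo => (original.toList.zip combo.toList).countP (fun ab => ab.1 != ab.2)
  let sortedC := PySem.List.sorted combinations distance_from_original false
  match max_combinations with
  | some m => if m ≠ 0 then PySem.List.slice sortedC none (some m) else sortedC
  | none => sortedC

-- ===== PORT B =====

-- SIM
def pvSim : PySem.Dict Char (List Char) :=
  PySem.Dict.ofList [('0',['3','8']),('1',['4','7']),('2',['7']),('3',['0','8']),('4',['1','7']),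
                     ('5',['6']),('6',['5']),('7',['1','4']),('8',['0','3']),('9',['5','3'])]

-- Strings under construction are kept on the List Char side (PySem.Chars; string
-- concatenation = list append, exact).  SIM[ch] raises KeyError on a non-digit ch
-- (excluded by Pre_), so getD with an unused default is exact on Pre_.
def generate_combinations_sorted_alt (code : String) (max_combinations : Option Int) : List String :=
  let original := code.toList
  let items : List (List Char × Nat) :=
    original.foldl (fun items ch =>
      items.flatMap (fun sd => (ch :: pvSim.getD ch []).map
        (fun a => (sd.1 ++ [a], sd.2 + (if a ≠ ch then 1 else 0)))))
      [([], 0)]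
  let buckets : List (List (List Char)) :=
    items.foldl (fun bk sd => bk.set sd.2 (bk.getD sd.2 [] ++ [sd.1]))
      (List.replicate (original.length + 1) [])
  let result : List String := buckets.flatten.map String.ofList
  match max_combinations with
  | some m => if m ≠ 0 then PySem.List.slice result none (some m) else result
  | none => result

-- ===== PRECONDITION & SPEC =====

def pvDigits : List Char := ['0','1','2','3','4','5','6','7','8','9']

-- Pre_ excludes exactly the codes containing a non-digit character: there A raises
-- ValueError (int(d)) and B raises KeyError (SIM[ch]).
def Pre_generate_combinations_sorted (code : String) (max_combinations : Option Int) : Prop :=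
  code.toList.all (fun c => pvDigits.contains c) = true
instance (code : String) (max_combinations : Option Int) : Decidable (Pre_generate_combinations_sorted code max_combinations) := by unfold Pre_generate_combinations_sorted; infer_instance

def pvWitness_generate_combinations_sorted : String × Option Int := ("85", some 3)

def Spec_generate_combinations_sorted (code : String) (max_combinations : Option Int) (out : List String) : Prop := out = generate_combinations_sorted_alt code max_combinations
instance (code : String) (max_combinations : Option Int) (out : List String) : Decidable (Spec_generate_combinations_sorted code max_combinations out) := by unfold Spec_generate_combinations_sorted; infer_instance

-- ===== CLAIM (what is proved, stated in full; the proofs are below) =====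
def Claim_equal_generate_combinations_sorted : Prop := ∀ (code : String) (max_combinations : Option Int), Dom_generate_combinations_sorted code max_combinations → Pre_generate_combinations_sorted code max_combinations → Spec_generate_combinations_sorted code max_combinations (generate_combinations_sorted code max_combinations)

-- ===== LEMMAS AND PROOFS =====

-- The common skeleton both programs realise: per-character alternatives, their product
-- (leftmost position varies slowest), and the number of positions differing from the original.
def pvAlts (c : Char) : List Char := c :: pvSim.getD c []

def pvProd : List Char → List (List Char)
  | [] => [[]]
  | c :: cs => (pvAlts c).flatMap (fun a => (pvProd cs).map (a :: ·))

def pvDist (cs l : List Char) : Nat := (cs.zip l).countP (fun ab => ab.1 != ab.2)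

def pvAltsI (d : Int) : List Int :=
  PySem.List.dedup (if pvSimilarLookingNumbers.contains d then [d] ++ pvSimilarLookingNumbers.getD d [] else [d])

def pvC2I (c : Char) : Int := (c.toNat : Int) - 48

-- digit-table bridges (ten cases each)
theorem pv_digit_alts : ∀ c ∈ pvDigits, pvAltsI (pvIntOfDigit c) = (pvAlts c).map pvC2I := by
  intro c hc
  simp only [pvDigits, List.mem_cons, List.not_mem_nil, or_false] at hc
  rcases hc with rfl|rfl|rfl|rfl|rfl|rfl|rfl|rfl|rfl|rfl <;> decide

theorem pv_digit_toChars : ∀ c ∈ pvDigits, PySem.Int.toChars (pvC2I c) = [c] := by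
  intro c hc
  simp only [pvDigits, List.mem_cons, List.not_mem_nil, or_false] at hc
  rcases hc with rfl|rfl|rfl|rfl|rfl|rfl|rfl|rfl|rfl|rfl <;> decide

theorem pv_alts_digits : ∀ c ∈ pvDigits, ∀ a ∈ pvAlts c, a ∈ pvDigits := by
  have h : ∀ c ∈ pvDigits, (pvAlts c).all (fun a => pvDigits.contains a) = true := by
    intro c hc
    simp only [pvDigits, List.mem_cons, List.not_mem_nil, or_false] at hc
    rcases hc with rfl|rfl|rfl|rfl|rfl|rfl|rfl|rfl|rfl|rfl <;> decide
  intro c hc a ha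
  have := List.all_eq_true.mp (h c hc) a ha
  simp at this
  exact this

theorem pvProd_mem_digits : ∀ (cs : List Char), (∀ c ∈ cs, c ∈ pvDigits) →
    ∀ l ∈ pvProd cs, ∀ a ∈ l, a ∈ pvDigits := by
  intro cs
  induction cs with
  | nil => intro _ l hl; simp [pvProd] at hl; simp [hl]
  | cons c cs ih =>
    intro h l hl
    simp only [pvProd, List.mem_flatMap, List.mem_map] at hl
    obtain ⟨a, ha, t, ht, rfl⟩ := hl
    intro b hb
    rcases List.mem_cons.mp hb with rfl | hb
    · exact pv_alts_digits c (h c (List.mem_cons_self)) b ha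
    · exact ih (fun x hx => h x (List.mem_cons_of_mem _ hx)) t ht b hb

theorem pvDist_le (cs l : List Char) : pvDist cs l ≤ cs.length := by
  calc pvDist cs l ≤ (cs.zip l).length := List.countP_le_length
  _ ≤ cs.length := by rw [List.length_zip]; omega

-- A's product of int-alternatives is pvProd mapped through pvC2I
theorem pvA_prod (cs : List Char) (h : ∀ c ∈ cs, c ∈ pvDigits) :
    (cs.map (fun c => pvAltsI (pvIntOfDigit c))).foldr (fun p acc => p.flatMap (fun x => acc.map (x :: ·))) [[]]
      = (pvProd cs).map (fun l => l.map pvC2I) := by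
  induction cs with
  | nil => simp [pvProd]
  | cons c cs ih =>
    have hc := pv_digit_alts c (h c List.mem_cons_self)
    simp only [List.map_cons, List.foldr_cons,
      ih (fun x hx => h x (List.mem_cons_of_mem _ hx)), pvProd, hc]
    simp [List.flatMap_map, List.map_flatMap, List.map_map, Function.comp_def]

-- joining single-digit strings reassembles the character list
theorem pvA_join (l : List Char) (h : ∀ a ∈ l, a ∈ pvDigits) :
    PySem.Str.join "" ((l.map pvC2I).map PySem.Int.toStr) = String.ofList l := by
  have ht : (PySem.Str.join "" ((l.map pvC2I).map PySem.Int.toStr)).toList = l := by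
    rw [PySem.Str.toList_join]
    have : ((l.map pvC2I).map PySem.Int.toStr).map String.toList = l.map (fun c => [c]) := by
      simp only [List.map_map]
      refine List.map_congr_left (fun a ha => ?_)
      simp only [Function.comp_def, PySem.Int.toList_toStr]
      exact pv_digit_toChars a (h a ha)
    rw [this]
    simp [PySem.Chars.join_nil_singletons l]
  calc PySem.Str.join "" ((l.map pvC2I).map PySem.Int.toStr)
      = String.ofList ((PySem.Str.join "" ((l.map pvC2I).map PySem.Int.toStr)).toList) := by
        rw [String.ofList_toList]
  _ = String.ofList l := by rw [ht]

theorem pvA_combos (code : String) (h : ∀ c ∈ code.toList, c ∈ pvDigits) :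
    generate_combinations code = (pvProd code.toList).map String.ofList := by
  unfold generate_combinations
  simp only [List.map_map]
  have hfn : ((fun digit => PySem.List.dedup
        (if pvSimilarLookingNumbers.contains digit = true then [digit] ++ pvSimilarLookingNumbers.getD digit []
        else [digit])) ∘ pvIntOfDigit) = (fun c => pvAltsI (pvIntOfDigit c)) := rfl
  rw [hfn, pvA_prod code.toList h]
  rw [List.map_map]
  refine List.map_congr_left (fun l hl => ?_)
  exact pvA_join l (pvProd_mem_digits code.toList h l hl)

-- B's generation loop: the product together with the running distance
theorem pvB_items (cs : List Char) (acc : List (List Char × Nat)) :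
    cs.foldl (fun items ch =>
        items.flatMap (fun sd => (ch :: pvSim.getD ch []).map (fun a => (sd.1 ++ [a], sd.2 + (if a ≠ ch then 1 else 0))))) acc
      = acc.flatMap (fun sd => (pvProd cs).map (fun l => (sd.1 ++ l, sd.2 + pvDist cs l))) := by
  induction cs generalizing acc with
  | nil =>
    simp [pvProd, pvDist]
  | cons c cs ih =>
    rw [List.foldl_cons, ih]
    rw [List.flatMap_assoc]
    refine List.flatMap_congr (fun sd _ => ?_)
    simp only [pvProd, pvAlts, List.flatMap_map, List.map_flatMap, List.map_map]
    refine List.flatMap_congr (fun a _ => ?_)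
    refine List.map_congr_left (fun l _ => ?_)
    simp only [Function.comp_def]
    refine Prod.ext ?_ ?_
    · simp
    · simp only [pvDist, List.zip_cons_cons, List.countP_cons]
      by_cases hac : a = c
      · subst hac; simp
      · have hca : c ≠ a := fun hh => hac hh.symm
        rw [if_pos hac, if_pos (by simpa [bne_iff_ne] using hca)]
        omega

-- updating ((range k).map f) at an index below k
theorem pv_set_map_range {α : Type} (k d : Nat) (f : Nat → α) (v : α) :
    ((List.range k).map f).set d v = (List.range k).map (fun i => if i = d then v else f i) := by
  apply List.ext_getElem
  · simp
  · intro i hi hi'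
    simp only [List.getElem_set, List.getElem_map, List.getElem_range]
    by_cases hdi : d = i
    · simp [hdi]
    · simp [hdi, Ne.symm hdi]

theorem pv_getD_map_range {α : Type} (k d : Nat) (f : Nat → α) (dflt : α) (h : d < k) :
    ((List.range k).map f).getD d dflt = f d := by
  rw [List.getD_eq_getElem?_getD]
  simp [h]

-- B's bucket loop is "filter by distance", bucket by bucket
theorem pvB_buckets (its : List (List Char × Nat)) (k : Nat) (f : Nat → List (List Char))
    (h : ∀ sd ∈ its, sd.2 < k) :
    its.foldl (fun bk sd => bk.set sd.2 (bk.getD sd.2 [] ++ [sd.1])) ((List.range k).map f)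
      = (List.range k).map (fun d => f d ++ (its.filter (fun sd => decide (sd.2 = d))).map (·.1)) := by
  induction its generalizing f with
  | nil => simp
  | cons sd its ih =>
    have hsd : sd.2 < k := h sd List.mem_cons_self
    rw [List.foldl_cons, pv_getD_map_range k sd.2 f [] hsd, pv_set_map_range k sd.2 f _,
      ih (fun i => if i = sd.2 then f sd.2 ++ [sd.1] else f i) (fun x hx => h x (List.mem_cons_of_mem _ hx))]
    refine List.map_congr_left (fun d _ => ?_)
    by_cases hd : sd.2 = d
    · subst hd
      simp
    · simp [hd, Ne.symm hd]

-- insertBy walks past a block it does not go before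
theorem pv_insertBy_skip {α : Type} (bef : α → α → Bool) (x : α) (B R : List α)
    (h : ∀ y ∈ B, bef x y = false) :
    PySem.List.insertBy bef x (B ++ R) = B ++ PySem.List.insertBy bef x R := by
  induction B with
  | nil => simp
  | cons b B ih =>
    have hb : bef x b = false := h b List.mem_cons_self
    simp only [List.cons_append, PySem.List.insertBy, hb]
    simp [ih (fun y hy => h y (List.mem_cons_of_mem _ hy))]

-- inserting into bucketed data appends to the element's own bucket
theorem pv_insertBy_buckets {α : Type} (key : α → Nat) (x : α) (ds : List Nat) (F : Nat → List α)
    (hF : ∀ d ∈ ds, ∀ y ∈ F d, key y = d) (hp : ds.Pairwise (· < ·)) (hx : key x ∈ ds) :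
    PySem.List.insertBy (fun a b => decide (key a < key b)) x (ds.flatMap F)
      = ds.flatMap (fun d => if d = key x then F d ++ [x] else F d) := by
  induction ds with
  | nil => simp at hx
  | cons d ds ih =>
    have hlt : ∀ e ∈ ds, d < e := (List.pairwise_cons.mp hp).1
    by_cases hd : d = key x
    · subst hd
      -- skip the bucket of equal keys, then insert in front of the rest
      have hskip : ∀ y ∈ F (key x), (fun a b => decide (key a < key b)) x y = false := by
        intro y hy
        have := hF (key x) List.mem_cons_self y hy
        simp [this]
      rw [List.flatMap_cons, pv_insertBy_skip _ x _ _ hskip]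
      have hrest : ∀ y ∈ ds.flatMap F, (fun a b => decide (key a < key b)) x y = true := by
        intro y hy
        rcases List.mem_flatMap.mp hy with ⟨e, he, hye⟩
        have hk := hF e (List.mem_cons_of_mem _ he) y hye
        simp [hk, hlt e he]
      have hfront : PySem.List.insertBy (fun a b => decide (key a < key b)) x (ds.flatMap F)
          = x :: ds.flatMap F := by
        cases hds : ds.flatMap F with
        | nil => simp [PySem.List.insertBy]
        | cons z R =>
          have hz := hrest z (by rw [hds]; exact List.mem_cons_self)
          simp only [PySem.List.insertBy, hz]
          simp
      rw [hfront]
      have hnot : ∀ e ∈ ds, ¬ (e = key x) := fun e he => by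
        have := hlt e he; omega
      rw [List.flatMap_cons]
      simp only [if_true]
      rw [show (ds.flatMap fun e => if e = key x then F e ++ [x] else F e) = ds.flatMap F from
        List.flatMap_congr (fun e he => by rw [if_neg (hnot e he)])]
      simp
    · -- this bucket's keys are strictly below key x: walk past it
      have hxds : key x ∈ ds := by
        rcases List.mem_cons.mp hx with h1 | h1
        · exact absurd h1.symm hd
        · exact h1
      have hdlt : d < key x := hlt _ hxds
      have hskip : ∀ y ∈ F d, (fun a b => decide (key a < key b)) x y = false := by
        intro y hy
        have := hF d List.mem_cons_self y hy
        simp [this]; omega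
      rw [List.flatMap_cons, pv_insertBy_skip _ x _ _ hskip, List.flatMap_cons,
        ih (fun e he => hF e (List.mem_cons_of_mem _ he)) (List.pairwise_cons.mp hp).2 hxds,
        if_neg hd]

-- a stable sort on a Nat key bounded by n is the concatenation of the key's fibers
theorem pv_sorted_buckets {α : Type} (xs : List α) (key : α → Nat) (n : Nat)
    (h : ∀ x ∈ xs, key x ≤ n) :
    PySem.List.sorted xs key false
      = (List.range (n+1)).flatMap (fun d => xs.filter (fun x => decide (key x = d))) := by
  induction xs using List.reverseRecOn with
  | nil => simp [PySem.List.sorted_eq_foldl_insertBy]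
  | append_singleton xs x ih =>
    have hxs : ∀ y ∈ xs, key y ≤ n := fun y hy => h y (List.mem_append_left _ hy)
    have hx : key x ≤ n := h x (List.mem_append_right _ List.mem_cons_self)
    rw [PySem.List.sorted_eq_foldl_insertBy, List.foldl_append, List.foldl_cons, List.foldl_nil,
      ← PySem.List.sorted_eq_foldl_insertBy, ih hxs]
    rw [pv_insertBy_buckets key x (List.range (n+1))
      (fun d => xs.filter (fun y => decide (key y = d)))
      (fun d _ y hy => by simpa using List.of_mem_filter hy)
      List.pairwise_lt_range (by simp [List.mem_range]; omega)]
    refine List.flatMap_congr (fun d _ => ?_)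
    by_cases hxd : d = key x
    · subst hxd
      simp [List.filter_append]
    · simp [List.filter_append, Ne.symm hxd, hxd]

-- ===== VERDICT (by name: the statement is the Claim_ definition above) =====
theorem generate_combinations_sorted_spec : Claim_equal_generate_combinations_sorted := by
  intro code max_combinations _ hpre
  unfold Spec_generate_combinations_sorted
  have hdig : ∀ c ∈ code.toList, c ∈ pvDigits := by
    intro c hc
    have := List.all_eq_true.mp hpre c hc
    simpa using this
  have hmain :
      PySem.List.sorted (generate_combinations code)
        (fun combo => (code.toList.zip combo.toList).countP (fun ab => ab.1 != ab.2)) false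
      = ((code.toList.foldl (fun items ch =>
            items.flatMap (fun sd => (ch :: pvSim.getD ch []).map
              (fun a => (sd.1 ++ [a], sd.2 + (if a ≠ ch then 1 else 0)))))
            [([], 0)]).foldl (fun bk sd => bk.set sd.2 (bk.getD sd.2 [] ++ [sd.1]))
            (List.replicate (code.toList.length + 1) [])).flatten.map String.ofList := by
    set cs := code.toList with hcs
    set n := cs.length with hn
    -- B's generation loop produces the product together with its distances
    have hitems : cs.foldl (fun items ch =>
          items.flatMap (fun sd => (ch :: pvSim.getD ch []).map
            (fun a => (sd.1 ++ [a], sd.2 + (if a ≠ ch then 1 else 0))))) [([], 0)]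
        = (pvProd cs).map (fun l => (l, pvDist cs l)) := by
      rw [pvB_items cs [([], 0)]]
      simp
    rw [hitems]
    -- B's bucket loop filters by distance
    have hrepl : (List.replicate (n + 1) ([] : List (List Char)))
        = (List.range (n + 1)).map (fun _ => []) := by
      rw [List.map_const', List.length_range]
    rw [hrepl, pvB_buckets _ (n + 1) (fun _ => [])
      (by
        intro sd hsd
        rcases List.mem_map.mp hsd with ⟨l, _, rfl⟩
        have := pvDist_le cs l
        omega)]
    -- both sides are the concatenation of the distance fibers of the product
    rw [pvA_combos code hdig, pv_sorted_buckets ((pvProd cs).map String.ofList)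
      (fun combo => (cs.zip combo.toList).countP (fun ab => ab.1 != ab.2)) n
      (by
        intro x hx
        rcases List.mem_map.mp hx with ⟨l, _, rfl⟩
        simpa [String.toList_ofList, pvDist] using pvDist_le cs l)]
    rw [List.map_flatten]
    refine congrArg List.flatten ?_
    rw [List.map_map]
    refine List.map_congr_left (fun d _ => ?_)
    simp only [List.nil_append, List.filter_map, List.map_map, Function.comp_def,
      String.toList_ofList, pvDist]
  -- the common slicing wrapper
  cases max_combinations with
  | none =>
    simp only [generate_combinations_sorted, generate_combinations_sorted_alt]
    exact hmain
  | some m =>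
    simp only [generate_combinations_sorted, generate_combinations_sorted_alt]
    by_cases hm : m = 0
    · simp [hm, hmain]
    · simp [hm, hmain]
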